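-- pv_equiv track=rewrite | github.com/remap-cisreg/remap-pipeline | 2.scripts/utils/python3/extract_info_download.py | numbering_replicat
-- ===== SOURCE A (Python) =====
-- def numbering_replicat( list_remap_sampleID, list_ena_line):
-- 	# priming biological replicat
-- 	nb_rep_bio = 1
-- 	list_sample_name = []
--
-- 	# parsing all sample of experiment
-- 	for remap_GSM in list_remap_sampleID:
--
-- 		# priming technical replicat
-- 		nb_rep_tech = 1
--
-- 		for ena_line in list_ena_line:
--
-- 			if remap_GSM in ena_line:
--
-- 				list_sample_name.append( [ str( nb_rep_bio), str( nb_rep_tech)] + ena_line)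
--
-- 				nb_rep_tech += 1
--
--
-- 		nb_rep_bio += 1
-- 	return  list_sample_name
-- ===== SOURCE B (Python) =====
-- def numbering_replicat(list_remap_sampleID, list_ena_line):
--     # Bucket each ena line once per distinct sample ID it contains (one pass
--     # over all lines), then emit numbered rows by direct bucket lookup.
--     buckets = {}
--     for gsm in list_remap_sampleID:
--         buckets.setdefault(gsm, [])
--     for ena_line in list_ena_line:
--         seen = set()
--         for v in ena_line:
--             if v in buckets and v not in seen:
--                 buckets[v].append(ena_line)
--                 seen.add(v)
--     out = []
--     nb_rep_bio = 1
--     for gsm in list_remap_sampleID: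
--         nb_rep_tech = 1
--         for line in buckets[gsm]:
--             out.append([str(nb_rep_bio), str(nb_rep_tech)] + line)
--             nb_rep_tech += 1
--         nb_rep_bio += 1
--     return out
-- ===== Notes on version B (the rewrite author's own statement) =====
-- stated objective: alternative
-- what changed: B makes a single bucketing pass over the ENA lines, grouping each line under every distinct sample ID it contains via a dict, and then emits the numbered rows by direct bucket lookup, instead of A's rescan of all ENA lines for every sample ID.
import Mathlib
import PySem

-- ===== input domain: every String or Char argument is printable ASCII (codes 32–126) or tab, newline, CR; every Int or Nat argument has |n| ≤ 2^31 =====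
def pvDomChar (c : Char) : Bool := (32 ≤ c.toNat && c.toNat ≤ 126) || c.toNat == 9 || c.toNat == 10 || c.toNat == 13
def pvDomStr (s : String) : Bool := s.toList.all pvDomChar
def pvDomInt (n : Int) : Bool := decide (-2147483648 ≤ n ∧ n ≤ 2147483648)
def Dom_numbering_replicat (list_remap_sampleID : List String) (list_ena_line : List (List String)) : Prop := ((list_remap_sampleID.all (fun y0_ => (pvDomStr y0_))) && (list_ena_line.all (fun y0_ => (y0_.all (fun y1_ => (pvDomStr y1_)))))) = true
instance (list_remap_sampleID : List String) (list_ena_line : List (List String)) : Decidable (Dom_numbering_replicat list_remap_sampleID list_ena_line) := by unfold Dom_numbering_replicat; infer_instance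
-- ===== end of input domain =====

-- B buckets each ENA line once per distinct sample ID it contains (one dict-indexed pass over
-- the lines), then emits numbered rows by lookup, instead of A's rescan of all lines per sample ID.

-- ===== PORT A =====
def numbering_replicat (list_remap_sampleID : List String) (list_ena_line : List (List String)) : List (List String) :=
  (list_remap_sampleID.foldl
    (fun (p : List (List String) × Int) remap_GSM =>
      let r := list_ena_line.foldl
        (fun (q : List (List String) × Int) ena_line =>
          if remap_GSM ∈ ena_line then
            (q.1 ++ [[PySem.Int.toStr p.2, PySem.Int.toStr q.2] ++ ena_line], q.2 + 1)
          else q)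
        (p.1, 1)
      (r.1, p.2 + 1))
    ([], 1)).1

-- ===== PORT B =====
-- 'for gsm in ids: buckets.setdefault(gsm, [])'
def nrAltInit (list_remap_sampleID : List String) : PySem.Dict String (List (List String)) :=
  list_remap_sampleID.foldl (fun d gsm => d.setdefault gsm []) PySem.Dict.empty

-- 'for ena_line in lines: seen = set(); for v in ena_line: if v in buckets and v not in seen: …'
def nrAltFill (buckets : PySem.Dict String (List (List String))) (list_ena_line : List (List String)) : PySem.Dict String (List (List String)) :=
  list_ena_line.foldl
    (fun d ena_line =>
      (ena_line.foldl
        (fun (p : PySem.Dict String (List (List String)) × List String) v =>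
          if p.1.contains v = true ∧ v ∉ p.2 then
            (p.1.modify v [] (· ++ [ena_line]), PySem.Set.add p.2 v)
          else p)
        (d, (PySem.Set.ofList []))).1)
    buckets

def numbering_replicat_alt (list_remap_sampleID : List String) (list_ena_line : List (List String)) : List (List String) :=
  let buckets := nrAltFill (nrAltInit list_remap_sampleID) list_ena_line
  (list_remap_sampleID.foldl
    (fun (p : List (List String) × Int) gsm =>
      let r := (buckets.getD gsm []).foldl
        (fun (q : List (List String) × Int) line =>
          (q.1 ++ [[PySem.Int.toStr p.2, PySem.Int.toStr q.2] ++ line], q.2 + 1))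
        (p.1, 1)
      (r.1, p.2 + 1))
    ([], 1)).1

-- ===== PRECONDITION & SPEC =====
def Spec_numbering_replicat (list_remap_sampleID : List String) (list_ena_line : List (List String)) (out : List (List String)) : Prop := out = numbering_replicat_alt list_remap_sampleID list_ena_line
instance (list_remap_sampleID : List String) (list_ena_line : List (List String)) (out : List (List String)) : Decidable (Spec_numbering_replicat list_remap_sampleID list_ena_line out) := by unfold Spec_numbering_replicat; infer_instance

-- ===== CLAIM (what is proved, stated in full; the proofs are below) =====
def Claim_equal_numbering_replicat : Prop := ∀ (list_remap_sampleID : List String) (list_ena_line : List (List String)), Dom_numbering_replicat list_remap_sampleID list_ena_line → Spec_numbering_replicat list_remap_sampleID list_ena_line (numbering_replicat list_remap_sampleID list_ena_line)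

-- ===== LEMMAS AND PROOFS =====

-- the numbered rows produced for one sample ID from its list of matching lines
def nrNumb (bio t : Int) : List (List String) → List (List String)
  | [] => []
  | l :: ls => ([PySem.Int.toStr bio, PySem.Int.toStr t] ++ l) :: nrNumb bio (t + 1) ls

-- A's inner loop = numbered rows over the filtered lines
theorem nrA_inner (gsm : String) (bio : Int) :
    ∀ (ls : List (List String)) (acc : List (List String)) (t : Int),
    ls.foldl
      (fun (q : List (List String) × Int) ena_line =>
        if gsm ∈ ena_line then
          (q.1 ++ [[PySem.Int.toStr bio, PySem.Int.toStr q.2] ++ ena_line], q.2 + 1)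
        else q)
      (acc, t)
    = (acc ++ nrNumb bio t (ls.filter (fun l => decide (gsm ∈ l))), t + (ls.filter (fun l => decide (gsm ∈ l))).length) := by
  intro ls
  induction ls with
  | nil => intro acc t; simp [nrNumb]
  | cons l ls ih =>
    intro acc t
    by_cases h : gsm ∈ l
    · simp only [List.foldl_cons, if_pos h, ih, List.filter_cons, decide_eq_true h, if_pos trivial,
        List.length_cons, nrNumb, List.append_assoc, List.singleton_append]
      congr 1
      push_cast; ring
    · simp only [List.foldl_cons, if_neg h, ih, List.filter_cons, decide_eq_false h,
        Bool.false_eq_true, ite_false]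

-- B's output inner loop = numbered rows over the bucket
theorem nrB_inner (bio : Int) :
    ∀ (bs : List (List String)) (acc : List (List String)) (t : Int),
    bs.foldl
      (fun (q : List (List String) × Int) line =>
        (q.1 ++ [[PySem.Int.toStr bio, PySem.Int.toStr q.2] ++ line], q.2 + 1))
      (acc, t)
    = (acc ++ nrNumb bio t bs, t + bs.length) := by
  intro bs
  induction bs with
  | nil => intro acc t; simp [nrNumb]
  | cons b bs ih =>
    intro acc t
    simp only [List.foldl_cons, ih, nrNumb, List.append_assoc, List.singleton_append,
      List.length_cons]
    congr 1
    push_cast; ring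

-- the initial dict: key iff member of the id list, value []
theorem nrInit_get? (v : String) :
    ∀ (ids : List String) (d : PySem.Dict String (List (List String))),
    (ids.foldl (fun d gsm => d.setdefault gsm []) d).get? v
      = if (d.get? v).isSome then d.get? v else if v ∈ ids then some [] else none := by
  intro ids
  induction ids with
  | nil => intro d; cases hd : d.get? v <;> simp [hd]
  | cons i is ih =>
    intro d
    rw [List.foldl_cons, ih]
    by_cases hv : v = i
    · subst hv
      rw [PySem.Dict.get?_setdefault_self]
      cases h : d.get? v <;> simp
    · rw [PySem.Dict.get?_setdefault_of_ne _ _ hv]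
      by_cases h : (d.get? v).isSome <;> simp [h, hv]

-- one ENA line's element loop: appends the line to the bucket of v iff v is a key and v occurs
theorem nrFill_line (ena_line : List String) (d0 : PySem.Dict String (List (List String))) :
    ∀ (es : List String) (d : PySem.Dict String (List (List String))) (seen : List String),
    (∀ v, d.contains v = d0.contains v) →
    (∀ v, d.getD v [] = if v ∈ seen ∧ d0.contains v = true then d0.getD v [] ++ [ena_line] else d0.getD v []) →
    (∀ v, (es.foldl
        (fun (p : PySem.Dict String (List (List String)) × List String) v =>
          if p.1.contains v = true ∧ v ∉ p.2 then
            (p.1.modify v [] (· ++ [ena_line]), PySem.Set.add p.2 v)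
          else p)
        (d, seen)).1.contains v = d0.contains v) ∧
    (∀ v, (es.foldl
        (fun (p : PySem.Dict String (List (List String)) × List String) v =>
          if p.1.contains v = true ∧ v ∉ p.2 then
            (p.1.modify v [] (· ++ [ena_line]), PySem.Set.add p.2 v)
          else p)
        (d, seen)).1.getD v []
      = if (v ∈ seen ∨ v ∈ es) ∧ d0.contains v = true then d0.getD v [] ++ [ena_line] else d0.getD v []) := by
  intro es
  induction es with
  | nil =>
    intro d seen hc hm
    refine ⟨hc, fun v => ?_⟩
    simpa using hm v
  | cons e es ih =>
    intro d seen hc hm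
    rw [List.foldl_cons]
    by_cases hcond : d.contains e = true ∧ e ∉ seen
    · rw [if_pos hcond]
      obtain ⟨hk, hs⟩ := hcond
      have hc' : ∀ v, (d.modify e [] (· ++ [ena_line])).contains v = d0.contains v := by
        intro v
        rw [PySem.Dict.contains_modify]
        by_cases hv : v = e
        · subst hv
          simp only [beq_self_eq_true, Bool.true_or]
          rw [← hc v] at *
          exact hk.symm
        · simp [beq_eq_false_iff_ne.mpr hv, hc v]
      have hm' : ∀ v, (d.modify e [] (· ++ [ena_line])).getD v []
          = if v ∈ PySem.Set.add seen e ∧ d0.contains v = true then d0.getD v [] ++ [ena_line] else d0.getD v [] := by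
        intro v
        rw [PySem.Dict.getD_modify]
        by_cases hv : v = e
        · subst hv
          have h0 : d0.contains v = true := (hc v) ▸ hk
          have : d.getD v [] = d0.getD v [] := by
            rw [hm v]; simp [hs]
          simp [this, PySem.Set.mem_add, h0]
        · have hmem : v ∈ PySem.Set.add seen e ↔ v ∈ seen := by
            simp [PySem.Set.mem_add, hv]
          rw [if_neg hv, hm v, if_congr (and_congr_left' hmem.symm) rfl rfl]
      obtain ⟨ihc, ihm⟩ := ih (d.modify e [] (· ++ [ena_line])) (PySem.Set.add seen e) hc' hm'
      refine ⟨ihc, fun v => ?_⟩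
      rw [ihm v]
      have hiff : (v ∈ PySem.Set.add seen e ∨ v ∈ es) ↔ (v ∈ seen ∨ v ∈ e :: es) := by
        simp only [PySem.Set.mem_add, List.mem_cons]
        tauto
      rw [if_congr (and_congr_left' hiff) rfl rfl]
    · rw [if_neg hcond]
      obtain ⟨ihc, ihm⟩ := ih d seen hc hm
      refine ⟨ihc, fun v => ?_⟩
      rw [ihm v]
      by_cases hv : v = e
      · subst hv
        rcases not_and_or.mp hcond with h | h
        · have h0 : d0.contains v = false := by
            rw [← hc v]; exact Bool.not_eq_true _ ▸ (by simpa using h)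
          simp [h0]
        · have hvs : v ∈ seen := not_not.mp h
          simp [hvs]
      · have : (v ∈ seen ∨ v ∈ es) ↔ (v ∈ seen ∨ v ∈ e :: es) := by
          simp only [List.mem_cons]; tauto
        rw [if_congr (and_congr_left' this) rfl rfl]

-- whole fill loop: the bucket of every key collects exactly the lines containing it, in order
theorem nrFill_spec :
    ∀ (lines : List (List String)) (d : PySem.Dict String (List (List String))),
    (∀ v, (nrAltFill d lines).contains v = d.contains v) ∧
    (∀ v, (nrAltFill d lines).getD v []
      = if d.contains v = true then d.getD v [] ++ lines.filter (fun l => decide (v ∈ l)) else d.getD v []) := by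
  intro lines
  induction lines with
  | nil =>
    intro d
    refine ⟨fun v => rfl, fun v => ?_⟩
    by_cases h : d.contains v = true <;> simp [nrAltFill, h]
  | cons l ls ih =>
    intro d
    have hline := nrFill_line l d l d (PySem.Set.ofList [])
      (fun v => rfl) (by intro v; simp)
    obtain ⟨hc1, hm1⟩ := hline
    set d1 := (l.foldl
        (fun (p : PySem.Dict String (List (List String)) × List String) v =>
          if p.1.contains v = true ∧ v ∉ p.2 then
            (p.1.modify v [] (· ++ [l]), PySem.Set.add p.2 v)
          else p)
        (d, (PySem.Set.ofList []))).1 with hd1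
    have hstep : nrAltFill d (l :: ls) = nrAltFill d1 ls := by
      simp only [nrAltFill, List.foldl_cons, hd1]
    obtain ⟨ihc, ihm⟩ := ih d1
    constructor
    · intro v
      rw [hstep, ihc v, hc1 v]
    · intro v
      rw [hstep, ihm v, hc1 v, hm1 v]
      by_cases hk : d.contains v = true
      · by_cases hl : v ∈ l
        · simp [hk, hl, List.append_assoc]
        · simp [hk, hl]
      · simp [hk]

theorem nrBucket_eq (ids : List String) (lines : List (List String)) (gsm : String) (h : gsm ∈ ids) :
    (nrAltFill (nrAltInit ids) lines).getD gsm [] = lines.filter (fun l => decide (gsm ∈ l)) := by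
  have hget : (nrAltInit ids).get? gsm = some [] := by
    rw [nrAltInit, nrInit_get? gsm ids PySem.Dict.empty]
    simp [PySem.Dict.get?_empty, h]
  have hk : (nrAltInit ids).contains gsm = true := by
    rw [PySem.Dict.contains_eq_isSome_get?, hget]; rfl
  have hD : (nrAltInit ids).getD gsm [] = [] := PySem.Dict.getD_of_get?_eq_some _ _ hget
  rw [(nrFill_spec lines (nrAltInit ids)).2 gsm, if_pos hk, hD, List.nil_append]

-- the two outer loops agree once every bucket equals its filter
theorem nrOuter (lines : List (List String)) (buckets : PySem.Dict String (List (List String))) :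
    ∀ (ids : List String),
    (∀ gsm ∈ ids, buckets.getD gsm [] = lines.filter (fun l => decide (gsm ∈ l))) →
    ∀ (acc : List (List String)) (bio : Int),
    ids.foldl
      (fun (p : List (List String) × Int) remap_GSM =>
        let r := lines.foldl
          (fun (q : List (List String) × Int) ena_line =>
            if remap_GSM ∈ ena_line then
              (q.1 ++ [[PySem.Int.toStr p.2, PySem.Int.toStr q.2] ++ ena_line], q.2 + 1)
            else q)
          (p.1, 1)
        (r.1, p.2 + 1))
      (acc, bio)
    = ids.foldl
      (fun (p : List (List String) × Int) gsm =>
        let r := (buckets.getD gsm []).foldl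
          (fun (q : List (List String) × Int) line =>
            (q.1 ++ [[PySem.Int.toStr p.2, PySem.Int.toStr q.2] ++ line], q.2 + 1))
          (p.1, 1)
        (r.1, p.2 + 1))
      (acc, bio) := by
  intro ids
  induction ids with
  | nil => intro _ acc bio; rfl
  | cons i is ih =>
    intro h acc bio
    have hb : buckets.getD i [] = lines.filter (fun l => decide (i ∈ l)) :=
      h i (List.mem_cons_self ..)
    simp only [List.foldl_cons, nrA_inner i bio lines acc 1, hb,
      nrB_inner bio (lines.filter (fun l => decide (i ∈ l))) acc 1]
    exact ih (fun g hg => h g (List.mem_cons_of_mem _ hg)) _ _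

-- ===== VERDICT (by name: the statement is the Claim_ definition above) =====
theorem numbering_replicat_spec : Claim_equal_numbering_replicat := by
  intro ids lines _
  unfold Spec_numbering_replicat numbering_replicat numbering_replicat_alt
  exact congrArg Prod.fst (nrOuter lines (nrAltFill (nrAltInit ids) lines) ids
    (fun g hg => nrBucket_eq ids lines g hg) [] 1)
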